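-- pv_equiv track=rewrite | github.com/Gary-L-Collins/docu-search | apps/worker/app/chunk.py | chunkify_text
-- ===== SOURCE A (Python) =====
-- from typing import List, Tuple
-- from bisect import bisect_right
--
-- def _page_for_offset(prefix_char: list[int], char_count: list[tuple[int, int]], offset: int) -> int:
--     # Map a character offset to the page containing that character.
--     page_idx = bisect_right(prefix_char, offset) - 1
--     page_idx = max(0, min(page_idx, len(char_count) - 1))
--     return char_count[page_idx][1]
--
-- def chunkify_text(text: str, char_count: Tuple[int, int], chunk_size: int=1024, overlap: int=256) -> List[Tuple[int, int, str]]: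
--     """
--     This function chunks up a string of text using a sliding window
--     :param text: the text
--     :param char_count: List of length of each page
--     :param chunk_size: the size of the window
--     :param overlap: the size of the overlapping portions of each chunk
--     :return: a list of chunks
--     """
--
--     if not text:
--         return []
--
--     assert overlap < chunk_size, "Overlap must be smaller than chunk_size"
--
--     # prefix sum for determining what pages you are on
--     prefix_char = [0] * (len(char_count)+1)
--     for i, (c, p) in enumerate(char_count):
--         prefix_char[i+1] = prefix_char[i] + c
--
--     # variables for tracking chunks
--     out, start, text_size = [], 0, len(text)
--
--     while start < text_size:
--         end = min(start + chunk_size, text_size)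
--         t = text[start:end].strip()
--
--         # get pages
--         start_page = _page_for_offset(prefix_char, char_count, start)
--         end_page = _page_for_offset(prefix_char, char_count, max(start, end - 1))
--
--         if t:
--             out.append((start_page, end_page, t))
--
--         if end == text_size:
--             break
--
--         start = end - overlap
--
--     return out
-- ===== SOURCE B (Python) =====
-- from typing import List, Tuple
--
-- def chunkify_text(text: str, char_count: Tuple[int, int], chunk_size: int=1024, overlap: int=256) -> List[Tuple[int, int, str]]:
--     # Same sliding window, but no prefix table and no binary search: two monotone
--     # page cursors (index + chars consumed before it) are advanced linearly, one
--     # for chunk starts and one for chunk ends.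
--     if not text:
--         return []
--
--     assert overlap < chunk_size, "Overlap must be smaller than chunk_size"
--
--     pages = len(char_count)
--     si, sb = 0, 0  # cursor for chunk starts: page index, chars before that page
--     ei, eb = 0, 0  # cursor for chunk ends
--     out, start, n = [], 0, len(text)
--
--     while start < n:
--         end = min(start + chunk_size, n)
--         t = text[start:end].strip()
--
--         while si + 1 < pages and sb + char_count[si][0] <= start:
--             sb += char_count[si][0]
--             si += 1
--         e_off = max(start, end - 1)
--         while ei + 1 < pages and eb + char_count[ei][0] <= e_off:
--             eb += char_count[ei][0]
--             ei += 1
--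
--         if t:
--             out.append((char_count[si][1], char_count[ei][1], t))
--
--         if end == n:
--             break
--
--         start = end - overlap
--
--     return out
-- ===== Notes on version B (the rewrite author's own statement) =====
-- stated objective: alternative
-- what changed: The prefix-sum array and per-chunk bisect_right binary search are replaced by two monotone page cursors (index plus running character boundary) advanced linearly across the whole scan, one for chunk starts and one for chunk ends.
-- outside the precondition, e.g. on chunkify_text('abc', [(5, 1), (-4, 2), (3, 3)], 5, 0): A returns [(1, 3, 'abc')], B returns [(1, 1, 'abc')]
import Mathlib
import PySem

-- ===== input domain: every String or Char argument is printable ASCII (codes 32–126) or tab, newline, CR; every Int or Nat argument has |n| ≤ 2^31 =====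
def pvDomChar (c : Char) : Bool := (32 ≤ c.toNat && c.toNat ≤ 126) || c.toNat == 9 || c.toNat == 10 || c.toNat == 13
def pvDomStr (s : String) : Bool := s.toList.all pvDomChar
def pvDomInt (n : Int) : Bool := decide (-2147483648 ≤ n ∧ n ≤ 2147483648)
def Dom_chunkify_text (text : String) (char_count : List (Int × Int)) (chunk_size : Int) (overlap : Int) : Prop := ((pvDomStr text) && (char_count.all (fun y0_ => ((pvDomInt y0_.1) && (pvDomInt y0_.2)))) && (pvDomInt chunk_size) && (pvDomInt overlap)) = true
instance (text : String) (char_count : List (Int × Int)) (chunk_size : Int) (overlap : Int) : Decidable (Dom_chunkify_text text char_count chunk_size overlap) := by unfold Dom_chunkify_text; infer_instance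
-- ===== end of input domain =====

-- B replaces A's prefix-sum table + per-chunk bisect_right binary search by two monotone
-- page cursors advanced linearly over the pages (alternative algorithm, same sliding window).

-- ===== PORT A =====
-- prefix_char = [0]*(len+1); prefix_char[i+1] = prefix_char[i] + c  (fold carrying the running sum)
def pvPrefixA (char_count : List (Int × Int)) : List Int :=
  (char_count.foldl (fun (st : List Int × Int) cp => (st.1 ++ [st.2 + cp.1], st.2 + cp.1)) ([0], 0)).1

-- _page_for_offset; char_count[page_idx] raises IndexError only for char_count = [] (excluded
-- by Pre_), so the .getD default is never the value used inside Pre_.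
def pvPageForOffset (prefix_char : List Int) (char_count : List (Int × Int)) (offset : Int) : Int :=
  let pidx : Int := (PySem.List.bisectRight prefix_char offset : Int) - 1
  let pidx : Int := max 0 (min pidx ((char_count.length : Int) - 1))
  ((PySem.List.pyGet? char_count pidx).getD (0, 0)).2

-- the while loop; fuel tl.length + 1 suffices: start strictly increases while start < len(text)
-- under the asserted overlap < chunk_size (outside Pre_ nothing is claimed)
def pvLoopA (tl : List Char) (prefix_char : List Int) (cc : List (Int × Int)) (chunk_size overlap : Int) :
    Nat → Int → List (Int × Int × String) → List (Int × Int × String)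
  | 0, _, out => out
  | fuel + 1, start, out =>
    if start < (tl.length : Int) then
      let e := min (start + chunk_size) (tl.length : Int)
      let t := PySem.Chars.strip (PySem.List.slice tl (some start) (some e))
      let start_page := pvPageForOffset prefix_char cc start
      let end_page := pvPageForOffset prefix_char cc (max start (e - 1))
      let out' := if t ≠ [] then out ++ [(start_page, end_page, String.ofList t)] else out
      if e = (tl.length : Int) then out'
      else pvLoopA tl prefix_char cc chunk_size overlap fuel (e - overlap) out'
    else out

def chunkify_text (text : String) (char_count : List (Int × Int)) (chunk_size : Int) (overlap : Int) : List (Int × Int × String) :=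
  let tl := text.toList
  if tl = [] then []
  else pvLoopA tl (pvPrefixA char_count) char_count chunk_size overlap (tl.length + 1) 0 []

-- ===== PORT B =====
-- 'while i + 1 < pages and b + char_count[i][0] <= off: ...' (cursor advance); char_count[i]
-- is in range whenever i + 1 < pages, so .getD is exact there.
def pvAdvance (cc : List (Int × Int)) (i : Nat) (b : Int) (off : Int) : Nat × Int :=
  if h : i + 1 < cc.length ∧ b + (cc.getD i (0, 0)).1 ≤ off then
    pvAdvance cc (i + 1) (b + (cc.getD i (0, 0)).1) off
  else (i, b)
termination_by cc.length - i
decreasing_by omega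

-- B's while loop carrying the two cursors (si, sb) and (ei, eb); char_count[si][1] with an
-- empty char_count is the IndexError excluded by Pre_ (the .getD default is never used inside Pre_)
def pvLoopB (tl : List Char) (cc : List (Int × Int)) (chunk_size overlap : Int) :
    Nat → Int → Nat → Int → Nat → Int → List (Int × Int × String) → List (Int × Int × String)
  | 0, _, _, _, _, _, out => out
  | fuel + 1, start, si, sb, ei, eb, out =>
    if start < (tl.length : Int) then
      let e := min (start + chunk_size) (tl.length : Int)
      let t := PySem.Chars.strip (PySem.List.slice tl (some start) (some e))
      let s' := pvAdvance cc si sb start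
      let e' := pvAdvance cc ei eb (max start (e - 1))
      let out' := if t ≠ [] then out ++ [((cc.getD s'.1 (0, 0)).2, (cc.getD e'.1 (0, 0)).2, String.ofList t)] else out
      if e = (tl.length : Int) then out'
      else pvLoopB tl cc chunk_size overlap fuel (e - overlap) s'.1 s'.2 e'.1 e'.2 out'
    else out

def chunkify_text_alt (text : String) (char_count : List (Int × Int)) (chunk_size : Int) (overlap : Int) : List (Int × Int × String) :=
  let tl := text.toList
  if tl = [] then []
  else pvLoopB tl char_count chunk_size overlap (tl.length + 1) 0 0 0 0 0 []

-- ===== PRECONDITION & SPEC =====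
-- Pre_ excludes (i) inputs where A raises: overlap ≥ chunk_size with nonempty text (AssertionError)
-- and empty char_count with nonempty text (IndexError); and (ii) negative page lengths, on which
-- A still returns but its pages come from bisect_right over an UNSORTED prefix array — an accidental
-- binary-search position no caller could rely on (see the cite in claim.json).
def Pre_chunkify_text (text : String) (char_count : List (Int × Int)) (chunk_size : Int) (overlap : Int) : Prop :=
  text = "" ∨ (overlap < chunk_size ∧ char_count ≠ [] ∧ ∀ p ∈ char_count, 0 ≤ p.1)
instance (text : String) (char_count : List (Int × Int)) (chunk_size : Int) (overlap : Int) : Decidable (Pre_chunkify_text text char_count chunk_size overlap) := by unfold Pre_chunkify_text; infer_instance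

def pvWitness_chunkify_text : String × (List (Int × Int)) × Int × Int := ("ab cd", [(2, 1), (3, 2)], 3, 1)

def Spec_chunkify_text (text : String) (char_count : List (Int × Int)) (chunk_size : Int) (overlap : Int) (out : List (Int × Int × String)) : Prop := out = chunkify_text_alt text char_count chunk_size overlap
instance (text : String) (char_count : List (Int × Int)) (chunk_size : Int) (overlap : Int) (out : List (Int × Int × String)) : Decidable (Spec_chunkify_text text char_count chunk_size overlap out) := by unfold Spec_chunkify_text; infer_instance

-- ===== CLAIM (what is proved, stated in full; the proofs are below) =====
def Claim_equal_chunkify_text : Prop := ∀ (text : String) (char_count : List (Int × Int)) (chunk_size : Int) (overlap : Int), Dom_chunkify_text text char_count chunk_size overlap → Pre_chunkify_text text char_count chunk_size overlap → Spec_chunkify_text text char_count chunk_size overlap (chunkify_text text char_count chunk_size overlap)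

-- ===== LEMMAS AND PROOFS =====

-- the list of partial sums s + c₁, s + c₁ + c₂, …
def pvTail (cc : List (Int × Int)) (s : Int) : List Int :=
  match cc with
  | [] => []
  | cp :: t => (s + cp.1) :: pvTail t (s + cp.1)

-- sum of the first j page lengths
def pvP (cc : List (Int × Int)) (j : Nat) : Int := ((cc.take j).map Prod.fst).sum

-- the clamped page index both programs compute for an offset
def pvIdx (cc : List (Int × Int)) (off : Int) : Nat :=
  min (PySem.List.bisectRight (pvPrefixA cc) off - 1) (cc.length - 1)

lemma pvPrefixA_foldl (cc : List (Int × Int)) : ∀ (acc : List Int) (s : Int),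
    (cc.foldl (fun (st : List Int × Int) cp => (st.1 ++ [st.2 + cp.1], st.2 + cp.1)) (acc, s)).1
      = acc ++ pvTail cc s := by
  induction cc with
  | nil => intro acc s; simp [pvTail]
  | cons cp t ih => intro acc s; simp [List.foldl_cons, ih, pvTail]

lemma pvPrefixA_eq (cc : List (Int × Int)) : pvPrefixA cc = 0 :: pvTail cc 0 := by
  have := pvPrefixA_foldl cc [0] 0
  simpa [pvPrefixA] using this

lemma pvTail_length (cc : List (Int × Int)) : ∀ s, (pvTail cc s).length = cc.length := by
  induction cc with
  | nil => intro s; simp [pvTail]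
  | cons cp t ih => intro s; simp [pvTail, ih]

lemma pvP_zero (cc : List (Int × Int)) : pvP cc 0 = 0 := by simp [pvP]

lemma pvP_succ (cc : List (Int × Int)) (i : Nat) (hi : i < cc.length) :
    pvP cc (i + 1) = pvP cc i + (cc.getD i (0, 0)).1 := by
  unfold pvP
  rw [List.getD_eq_getElem?_getD, List.getElem?_eq_getElem hi]
  rw [show List.map Prod.fst (List.take (i+1) cc) = List.take (i+1) (List.map Prod.fst cc) by simp,
      List.take_add_one, List.getElem?_map, List.getElem?_eq_getElem hi]
  simp

lemma pvTail_getElem (cc : List (Int × Int)) : ∀ (s : Int) (j : Nat) (hj : j < (pvTail cc s).length),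
    (pvTail cc s)[j] = s + pvP cc (j + 1) := by
  induction cc with
  | nil => intro s j hj; simp [pvTail] at hj
  | cons cp t ih =>
    intro s j hj
    cases j with
    | zero => simp [pvTail, pvP]
    | succ j =>
      simp only [pvTail, List.getElem_cons_succ]
      rw [ih]
      simp [pvP]
      ring

lemma pvTail_mem_ge (cc : List (Int × Int)) (hnn : ∀ p ∈ cc, 0 ≤ p.1) :
    ∀ (s : Int), ∀ x ∈ pvTail cc s, s ≤ x := by
  induction cc with
  | nil => intro s x hx; simp [pvTail] at hx
  | cons cp t ih =>
    intro s x hx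
    simp only [pvTail, List.mem_cons] at hx
    have h0 : 0 ≤ cp.1 := hnn cp (by simp)
    rcases hx with rfl | hx
    · omega
    · have := ih (fun p hp => hnn p (by simp [hp])) (s + cp.1) x hx
      omega

lemma pvTail_pairwise (cc : List (Int × Int)) (hnn : ∀ p ∈ cc, 0 ≤ p.1) :
    ∀ s : Int, List.Pairwise (fun a b => a ≤ b) (s :: pvTail cc s) := by
  induction cc with
  | nil => intro s; simp [pvTail]
  | cons cp t ih =>
    intro s
    have h0 : 0 ≤ cp.1 := hnn cp (by simp)
    have ht := ih (fun p hp => hnn p (by simp [hp])) (s + cp.1)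
    simp only [pvTail]
    refine List.Pairwise.cons ?_ ht
    intro b hb
    rcases List.mem_cons.mp hb with rfl | hb
    · omega
    · have := pvTail_mem_ge t (fun p hp => hnn p (by simp [hp])) (s + cp.1) b hb
      omega

lemma pvPrefix_sorted (cc : List (Int × Int)) (hnn : ∀ p ∈ cc, 0 ≤ p.1) :
    List.Pairwise (fun a b => a ≤ b) (pvPrefixA cc) := by
  rw [pvPrefixA_eq]
  simpa using pvTail_pairwise cc hnn 0

lemma pvPrefixA_length (cc : List (Int × Int)) : (pvPrefixA cc).length = cc.length + 1 := by
  rw [pvPrefixA_eq]; simp [pvTail_length]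

lemma pvPrefixA_getElem (cc : List (Int × Int)) (j : Nat) (hj : j < (pvPrefixA cc).length) :
    (pvPrefixA cc)[j] = pvP cc j := by
  rcases j with _ | j
  · simp [pvPrefixA_eq, pvP]
  · have hj' : j < (pvTail cc 0).length := by
      simp only [pvPrefixA_eq, List.length_cons] at hj; omega
    simp only [pvPrefixA_eq, List.getElem_cons_succ]
    rw [pvTail_getElem cc 0 j hj']
    omega

lemma pvBisect_pos (cc : List (Int × Int)) (off : Int) (hoff : 0 ≤ off)
    (hnn : ∀ p ∈ cc, 0 ≤ p.1) :
    1 ≤ PySem.List.bisectRight (pvPrefixA cc) off := by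
  obtain ⟨h1, h2, h3⟩ := PySem.List.bisectRight_spec (pvPrefixA cc) off (pvPrefix_sorted cc hnn)
  by_contra h
  have h0 : (0:Nat) < (pvPrefixA cc).length := by rw [pvPrefixA_length]; omega
  have := h3 0 h0 (by omega)
  rw [pvPrefixA_getElem cc 0 h0] at this
  simp [pvP] at this
  omega

lemma pvBisect_below (cc : List (Int × Int)) (off : Int)
    (hnn : ∀ p ∈ cc, 0 ≤ p.1) (j : Nat) (hj : j ≤ cc.length)
    (hlt : j < PySem.List.bisectRight (pvPrefixA cc) off) :
    pvP cc j ≤ off := by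
  obtain ⟨h1, h2, h3⟩ := PySem.List.bisectRight_spec (pvPrefixA cc) off (pvPrefix_sorted cc hnn)
  have hjl : j < (pvPrefixA cc).length := by rw [pvPrefixA_length]; omega
  have := h2 j hjl hlt
  rwa [pvPrefixA_getElem cc j hjl] at this

lemma pvBisect_above (cc : List (Int × Int)) (off : Int)
    (hnn : ∀ p ∈ cc, 0 ≤ p.1) (j : Nat) (hj : j ≤ cc.length)
    (hge : PySem.List.bisectRight (pvPrefixA cc) off ≤ j) :
    off < pvP cc j := by
  obtain ⟨h1, h2, h3⟩ := PySem.List.bisectRight_spec (pvPrefixA cc) off (pvPrefix_sorted cc hnn)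
  have hjl : j < (pvPrefixA cc).length := by rw [pvPrefixA_length]; omega
  have := h3 j hjl hge
  rwa [pvPrefixA_getElem cc j hjl] at this

lemma pvIdx_mono (cc : List (Int × Int)) (hnn : ∀ p ∈ cc, 0 ≤ p.1)
    {off off' : Int} (h : off ≤ off') : pvIdx cc off ≤ pvIdx cc off' := by
  have hmono : PySem.List.bisectRight (pvPrefixA cc) off ≤ PySem.List.bisectRight (pvPrefixA cc) off' := by
    by_contra hc
    push_neg at hc
    set r' := PySem.List.bisectRight (pvPrefixA cc) off' with hr'
    have hr'le : r' ≤ cc.length := by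
      have h1 := (PySem.List.bisectRight_spec (pvPrefixA cc) off (pvPrefix_sorted cc hnn)).1
      rw [pvPrefixA_length] at h1
      omega
    have h1 : pvP cc r' ≤ off := pvBisect_below cc off hnn r' hr'le hc
    have h2 : off' < pvP cc r' := pvBisect_above cc off' hnn r' hr'le le_rfl
    omega
  unfold pvIdx
  omega

lemma pvAdvance_eq (cc : List (Int × Int)) (hnn : ∀ p ∈ cc, 0 ≤ p.1) (hne : cc ≠ [])
    (off : Int) (hoff : 0 ≤ off) :
    ∀ (k si : Nat), cc.length - si ≤ k → si ≤ pvIdx cc off →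
      pvAdvance cc si (pvP cc si) off = (pvIdx cc off, pvP cc (pvIdx cc off)) := by
  have hm : 1 ≤ cc.length := by cases cc <;> simp_all
  have hr1 : 1 ≤ PySem.List.bisectRight (pvPrefixA cc) off := pvBisect_pos cc off hoff hnn
  intro k
  induction k with
  | zero =>
    intro si hk hsi
    exfalso
    have : pvIdx cc off ≤ cc.length - 1 := by unfold pvIdx; omega
    omega
  | succ k ih =>
    intro si hk hsi
    have hidxle : pvIdx cc off ≤ cc.length - 1 := by unfold pvIdx; omega
    rw [pvAdvance]
    split
    case isTrue h =>
      obtain ⟨hlt, hle⟩ := h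
      have hsilt : si < cc.length := by omega
      rw [← pvP_succ cc si hsilt] at hle ⊢
      have hnext : si + 1 ≤ pvIdx cc off := by
        by_contra hc
        push_neg at hc
        have hge : PySem.List.bisectRight (pvPrefixA cc) off ≤ si + 1 := by
          unfold pvIdx at hc
          omega
        have := pvBisect_above cc off hnn (si+1) (by omega) hge
        omega
      exact ih (si+1) (by omega) hnext
    case isFalse h =>
      have hsieq : si = pvIdx cc off := by
        rcases not_and_or.mp h with h1 | h2
        · omega
        · push_neg at h2
          have hsilt : si < cc.length := by omega
          rw [← pvP_succ cc si hsilt] at h2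
          have hrle : PySem.List.bisectRight (pvPrefixA cc) off ≤ si + 1 := by
            by_contra hc
            push_neg at hc
            have := pvBisect_below cc off hnn (si+1) (by omega) hc
            omega
          unfold pvIdx at hsi ⊢
          omega
      rw [hsieq]

lemma pvPageA_eq (cc : List (Int × Int)) (hnn : ∀ p ∈ cc, 0 ≤ p.1) (hne : cc ≠ [])
    (off : Int) (hoff : 0 ≤ off) :
    pvPageForOffset (pvPrefixA cc) cc off = (cc.getD (pvIdx cc off) (0, 0)).2 := by
  have hm : 1 ≤ cc.length := by cases cc <;> simp_all
  have hr := pvBisect_pos cc off hoff hnn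
  have hidx : pvIdx cc off < cc.length := by unfold pvIdx; omega
  dsimp only [pvPageForOffset]
  have hcast : max 0 (min ((PySem.List.bisectRight (pvPrefixA cc) off : Int) - 1) ((cc.length : Int) - 1))
      = ((pvIdx cc off : Nat) : Int) := by
    unfold pvIdx
    omega
  rw [hcast, PySem.List.pyGet?_natCast, List.getElem?_eq_getElem hidx]
  simp [List.getElem?_eq_getElem hidx]

lemma pvLoop_eq (tl : List Char) (cc : List (Int × Int)) (chunk_size overlap : Int)
    (hnn : ∀ p ∈ cc, 0 ≤ p.1) (hne : cc ≠ []) (hov : overlap < chunk_size) :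
    ∀ (fuel : Nat) (start : Int) (out : List (Int × Int × String)) (si : Nat) (sb : Int) (ei : Nat) (eb : Int),
      0 ≤ start →
      sb = pvP cc si → si ≤ pvIdx cc start →
      eb = pvP cc ei → ei ≤ pvIdx cc (max start (min (start + chunk_size) (tl.length : Int) - 1)) →
      pvLoopA tl (pvPrefixA cc) cc chunk_size overlap fuel start out
        = pvLoopB tl cc chunk_size overlap fuel start si sb ei eb out := by
  intro fuel
  induction fuel with
  | zero => intros; rfl
  | succ fuel ih =>
    intro start out si sb ei eb h0 hsb hsi heb hei
    rw [pvLoopA, pvLoopB]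
    by_cases hlt : start < (tl.length : Int)
    · simp only [if_pos hlt]
      have hoffE : (0:Int) ≤ max start (min (start + chunk_size) (tl.length : Int) - 1) :=
        le_trans h0 (le_max_left _ _)
      have hsadv : pvAdvance cc si sb start = (pvIdx cc start, pvP cc (pvIdx cc start)) := by
        rw [hsb]; exact pvAdvance_eq cc hnn hne start h0 cc.length si (by omega) hsi
      have headv : pvAdvance cc ei eb (max start (min (start + chunk_size) (tl.length : Int) - 1))
          = (pvIdx cc (max start (min (start + chunk_size) (tl.length : Int) - 1)),
             pvP cc (pvIdx cc (max start (min (start + chunk_size) (tl.length : Int) - 1)))) := by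
        rw [heb]; exact pvAdvance_eq cc hnn hne _ hoffE cc.length ei (by omega) hei
      rw [pvPageA_eq cc hnn hne start h0, pvPageA_eq cc hnn hne _ hoffE, hsadv, headv]
      by_cases hend : min (start + chunk_size) (tl.length : Int) = (tl.length : Int)
      · simp only [if_pos hend]
      · simp only [if_neg hend]
        apply ih
        · omega
        · rfl
        · exact le_trans (le_of_eq rfl) (pvIdx_mono cc hnn (by omega))
        · rfl
        · exact pvIdx_mono cc hnn (by omega)
    · simp only [if_neg hlt]

-- ===== VERDICT (by name: the statement is the Claim_ definition above) =====
theorem chunkify_text_spec : Claim_equal_chunkify_text := by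
  unfold Claim_equal_chunkify_text
  intro text cc chunk_size overlap hdom hpre
  unfold Spec_chunkify_text chunkify_text chunkify_text_alt
  by_cases htl : text.toList = []
  · simp [htl]
  · have hpre' : overlap < chunk_size ∧ cc ≠ [] ∧ ∀ p ∈ cc, 0 ≤ p.1 := by
      rcases hpre with h | h
      · exact absurd (by simp [h]) htl
      · exact h
    obtain ⟨hov, hne, hnn⟩ := hpre'
    simp only [if_neg htl]
    exact pvLoop_eq text.toList cc chunk_size overlap hnn hne hov (text.toList.length + 1) 0 [] 0 0 0 0
      le_rfl (pvP_zero cc).symm (Nat.zero_le _) (pvP_zero cc).symm (Nat.zero_le _)
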